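-- pv_equiv track=rewrite | github.com/mattvicentin/AIC-Educational-Tools-Update | src/utils/pin_synthesis.py | format_pins_for_context
-- ===== SOURCE A (Python) =====
-- from typing import List, Dict, Any, Optional
--
-- def format_pins_for_context(
--     pins: List[Dict[str, Any]],
--     max_chars: int = 15000
-- ) -> str:
--     """
--     Format pins into a context string for AI prompts.
--
--     Args:
--         pins: List of pin dictionaries (from PinChatMetadata.pins)
--         max_chars: Maximum characters for the combined context
--
--     Returns:
--         Formatted string with pin content
--     """
--     if not pins:
--         return ""
--
--     lines = []
--     total_chars = 0
--
--     for i, pin in enumerate(pins, 1):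
--         content = pin.get("content", "")
--         author = pin.get("author", "Unknown")
--         role = pin.get("role", "")
--
--         # Format each pin
--         role_label = f" ({role})" if role else ""
--         pin_text = f"[Pin {i}]{role_label} by {author}:\n{content}"
--
--         # Check if adding this pin would exceed limit
--         if total_chars + len(pin_text) + 2 > max_chars:
--             remaining = len(pins) - i + 1
--             lines.append(f"\n[...{remaining} more pins truncated for length]")
--             break
--
--         lines.append(pin_text)
--         total_chars += len(pin_text) + 2  # +2 for newlines
--
--     return "\n\n".join(lines)
-- ===== SOURCE B (Python) =====
-- from itertools import accumulate, takewhile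
-- from typing import List, Dict, Any
--
-- def _pin_text(i, pin):
--     role = pin.get("role", "")
--     role_label = f" ({role})" if role else ""
--     return f"[Pin {i}]{role_label} by {pin.get('author', 'Unknown')}:\n{pin.get('content', '')}"
--
-- def format_pins_for_context(pins: List[Dict[str, Any]], max_chars: int = 15000) -> str:
--     texts = [_pin_text(i, p) for i, p in enumerate(pins, 1)]
--     totals = accumulate(len(t) + 2 for t in texts)
--     k = len(list(takewhile(lambda s: s <= max_chars, totals)))
--     if k == len(texts):
--         return "\n\n".join(texts)
--     return "\n\n".join(texts[:k] + [f"\n[...{len(pins) - k} more pins truncated for length]"])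
-- ===== Notes on version B (the rewrite author's own statement) =====
-- stated objective: alternative
-- what changed: A's single interleaved loop (format each pin, track a running total, break early and emit the truncation note) is split into two passes: build every formatted pin text first, then find the cut index from a prefix sum of (len+2) via itertools.accumulate + takewhile, and assemble the kept prefix plus the truncation note.
import Mathlib
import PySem

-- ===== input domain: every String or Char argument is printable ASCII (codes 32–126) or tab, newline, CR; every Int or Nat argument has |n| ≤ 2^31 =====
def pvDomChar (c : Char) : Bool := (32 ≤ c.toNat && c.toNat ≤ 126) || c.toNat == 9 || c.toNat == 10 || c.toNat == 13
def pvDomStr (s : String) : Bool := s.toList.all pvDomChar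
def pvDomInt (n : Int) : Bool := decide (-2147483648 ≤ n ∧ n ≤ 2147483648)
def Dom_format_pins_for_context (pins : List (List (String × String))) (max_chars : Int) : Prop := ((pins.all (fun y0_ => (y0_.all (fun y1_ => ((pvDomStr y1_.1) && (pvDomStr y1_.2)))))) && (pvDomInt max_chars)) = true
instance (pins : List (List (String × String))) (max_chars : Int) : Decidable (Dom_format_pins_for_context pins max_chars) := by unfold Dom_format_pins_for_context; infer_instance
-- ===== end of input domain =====

-- B builds all pin texts first, then locates the cut point from a prefix sum of lengths
-- (accumulate + takewhile) instead of A's single interleaved loop with an early break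
-- (objective: alternative decomposition; same asymptotic cost).

-- dict.get(key, default) on an association list: first match (shared dict primitive of both ports)
def pvGetD (pin : List (String × String)) (key dflt : String) : String :=
  match pin with
  | [] => dflt
  | (k, v) :: rest => if k = key then v else pvGetD rest key dflt

-- ===== PORT A =====
-- the for-loop of A, with the 1-based index i, running total and the lines accumulator
def pvLoopA (max_chars : Int) (n : Int) :
    List (List (String × String)) → Int → Int → List String → List String
  | [], _, _, lines => lines
  | pin :: rest, i, total, lines =>
    let content := pvGetD pin "content" ""
    let author := pvGetD pin "author" "Unknown"
    let role := pvGetD pin "role" ""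
    let role_label := if role ≠ "" then " (" ++ role ++ ")" else ""
    let pin_text := "[Pin " ++ PySem.Int.toStr i ++ "]" ++ role_label ++ " by " ++ author ++ ":\n" ++ content
    if total + PySem.Str.len pin_text + 2 > max_chars then
      lines ++ ["\n[..." ++ PySem.Int.toStr (n - i + 1) ++ " more pins truncated for length]"]
    else
      pvLoopA max_chars n rest (i + 1) (total + PySem.Str.len pin_text + 2) (lines ++ [pin_text])

def format_pins_for_context (pins : List (List (String × String))) (max_chars : Int) : String :=
  if pins = [] then ""
  else PySem.Str.join "\n\n" (pvLoopA max_chars (pins.length : Int) pins 1 0 [])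

-- ===== PORT B =====
-- _pin_text(i, pin)
def pvPinText (i : Int) (pin : List (String × String)) : String :=
  let role := pvGetD pin "role" ""
  let role_label := if role ≠ "" then " (" ++ role ++ ")" else ""
  "[Pin " ++ PySem.Int.toStr i ++ "]" ++ role_label ++ " by " ++ pvGetD pin "author" "Unknown" ++ ":\n" ++ pvGetD pin "content" ""

-- [_pin_text(i, p) for i, p in enumerate(pins, 1)]
def pvPinTexts : Int → List (List (String × String)) → List String
  | _, [] => []
  | i, p :: rest => pvPinText i p :: pvPinTexts (i + 1) rest

-- itertools.accumulate
def pvAccum : Int → List Int → List Int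
  | _, [] => []
  | acc, x :: xs => (acc + x) :: pvAccum (acc + x) xs

def format_pins_for_context_alt (pins : List (List (String × String))) (max_chars : Int) : String :=
  let texts := pvPinTexts 1 pins
  let totals := pvAccum 0 (texts.map (fun t => PySem.Str.len t + 2))
  let k := (totals.takeWhile (fun s => decide (s ≤ max_chars))).length
  if k = texts.length then PySem.Str.join "\n\n" texts
  else PySem.Str.join "\n\n" (texts.take k ++ ["\n[..." ++ PySem.Int.toStr ((pins.length : Int) - (k : Int)) ++ " more pins truncated for length]"])

-- ===== PRECONDITION & SPEC =====
def Spec_format_pins_for_context (pins : List (List (String × String))) (max_chars : Int) (out : String) : Prop := out = format_pins_for_context_alt pins max_chars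
instance (pins : List (List (String × String))) (max_chars : Int) (out : String) : Decidable (Spec_format_pins_for_context pins max_chars out) := by unfold Spec_format_pins_for_context; infer_instance

-- ===== CLAIM (what is proved, stated in full; the proofs are below) =====
def Claim_equal_format_pins_for_context : Prop := ∀ (pins : List (List (String × String))) (max_chars : Int), Dom_format_pins_for_context pins max_chars → Spec_format_pins_for_context pins max_chars (format_pins_for_context pins max_chars)

-- ===== LEMMAS AND PROOFS =====

-- the cons step of A's loop, phrased through B's _pin_text helper (definitional)
lemma pvLoopA_cons (max_chars n i total : Int) (pin : List (String × String))
    (rest : List (List (String × String))) (lines : List String) :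
    pvLoopA max_chars n (pin :: rest) i total lines =
      if total + PySem.Str.len (pvPinText i pin) + 2 > max_chars then
        lines ++ ["\n[..." ++ PySem.Int.toStr (n - i + 1) ++ " more pins truncated for length]"]
      else
        pvLoopA max_chars n rest (i + 1) (total + PySem.Str.len (pvPinText i pin) + 2)
          (lines ++ [pvPinText i pin]) := rfl

-- A's loop equals B's "build all texts, cut at the prefix-sum overflow" description,
-- generalized over the loop state (start index i, running total, accumulated lines).
lemma pvLoopA_eq (max_chars : Int) (n : Int) :
    ∀ (rest : List (List (String × String))) (i total : Int) (lines : List String),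
      pvLoopA max_chars n rest i total lines =
        (let texts := pvPinTexts i rest
         let k := ((pvAccum total (texts.map (fun t => PySem.Str.len t + 2))).takeWhile
                    (fun s => decide (s ≤ max_chars))).length
         if k = texts.length then lines ++ texts
         else lines ++ texts.take k ++
              ["\n[..." ++ PySem.Int.toStr (n - (i + (k : Int)) + 1) ++ " more pins truncated for length]"]) := by
  intro rest
  induction rest with
  | nil => intro i total lines; simp [pvLoopA, pvPinTexts, pvAccum]
  | cons pin rest ih =>
    intro i total lines
    rw [pvLoopA_cons]
    have hassoc : total + PySem.Str.len (pvPinText i pin) + 2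
        = total + (PySem.Str.len (pvPinText i pin) + 2) := by ring
    rw [hassoc]
    simp only [pvPinTexts, List.map_cons, pvAccum, List.takeWhile_cons]
    by_cases h : total + (PySem.Str.len (pvPinText i pin) + 2) > max_chars
    · have hd : (decide (total + (PySem.Str.len (pvPinText i pin) + 2) ≤ max_chars)) = false := by
        simp only [decide_eq_false_iff_not]; omega
      rw [if_pos h, hd]
      simp only [Bool.false_eq_true, if_false, List.length_nil, List.take_zero]
      rw [if_neg (by simp)]
      simp
    · have hd : (decide (total + (PySem.Str.len (pvPinText i pin) + 2) ≤ max_chars)) = true := by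
        simp only [decide_eq_true_eq]; omega
      rw [if_neg h, ih, hd]
      simp only [if_true, List.length_cons]
      set texts := pvPinTexts (i + 1) rest with htexts
      set k := ((pvAccum (total + (PySem.Str.len (pvPinText i pin) + 2))
                  (texts.map (fun t => PySem.Str.len t + 2))).takeWhile
                 (fun s => decide (s ≤ max_chars))).length with hk
      by_cases hke : k = texts.length
      · rw [if_pos hke, if_pos (by omega)]
        simp
      · rw [if_neg hke, if_neg (by omega)]
        rw [List.take_succ_cons]
        have hidx : n - (i + 1 + (k : Int)) + 1 = n - (i + ((k + 1 : Nat) : Int)) + 1 := by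
          push_cast; ring
        rw [hidx]
        simp

-- ===== VERDICT (by name: the statement is the Claim_ definition above) =====
theorem format_pins_for_context_spec : Claim_equal_format_pins_for_context := by
  intro pins max_chars _
  unfold Spec_format_pins_for_context format_pins_for_context format_pins_for_context_alt
  by_cases hp : pins = []
  · subst hp
    simp [pvPinTexts, pvAccum]
    rfl
  · rw [if_neg hp, pvLoopA_eq]
    simp only [List.nil_append]
    set texts := pvPinTexts 1 pins with htexts
    set k := ((pvAccum 0 (texts.map (fun t => PySem.Str.len t + 2))).takeWhile
               (fun s => decide (s ≤ max_chars))).length with hk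
    by_cases hke : k = texts.length
    · rw [if_pos hke, if_pos hke]
    · rw [if_neg hke, if_neg hke]
      have hidx : (pins.length : Int) - (1 + (k : Int)) + 1 = (pins.length : Int) - (k : Int) := by
        ring
      rw [hidx]
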